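-- pv_equiv track=rewrite | github.com/pizza-d/Practice | ing.py | check56
-- ===== SOURCE A (Python) =====
-- def check56(a):
--     c5 = []
--     c6 = []
--     for i in range(2 ** 5):
--         x = str(format(i,'b').zfill(5))
--         if x == ''.join(reversed(x)):
--             c5.append(x)
--     for i in range(2 ** 6):
--         x = str(format(i,'b').zfill(6))
--         if x == x[len(x)::-1]:
--             c6.append(x)
--
--     for i in c6:
--         if a.find(i) >= 0:
--             return 1
--     for i in c5:
--         if a.find(i) >= 0:
--             return 1
--     return 0
-- ===== SOURCE B (Python) =====
-- def check56(a):
--     # scan each window directly and test "binary palindrome" instead of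
--     # searching for the 16 precomputed palindromes
--     n = len(a)
--     for i in range(n):
--         for L in (6, 5):
--             w = a[i:i+L]
--             if len(w) == L and all(c in "01" for c in w) and w == w[::-1]:
--                 return 1
--     return 0
-- ===== Notes on version B (the rewrite author's own statement) =====
-- stated objective: alternative
-- what changed: B drops A's precomputed tables of all 5/6-bit palindromes and its 16 substring searches; instead it slides one window over the string and tests each 5/6-length window directly for being a binary palindrome.
import Mathlib
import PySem

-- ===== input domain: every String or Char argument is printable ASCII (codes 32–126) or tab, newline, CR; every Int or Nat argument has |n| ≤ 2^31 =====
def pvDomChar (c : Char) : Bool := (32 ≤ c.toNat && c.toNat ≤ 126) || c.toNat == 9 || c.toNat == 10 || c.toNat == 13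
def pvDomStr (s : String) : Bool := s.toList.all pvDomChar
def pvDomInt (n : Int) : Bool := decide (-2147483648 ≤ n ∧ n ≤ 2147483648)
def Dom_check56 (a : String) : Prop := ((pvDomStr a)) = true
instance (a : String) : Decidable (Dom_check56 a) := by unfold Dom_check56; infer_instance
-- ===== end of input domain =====

-- B replaces A's precomputed palindrome tables and 16 substring searches by a direct
-- sliding-window test ("alternative": structurally different, similar cost).


-- ===== PORT A =====
-- A's first table loop: x = str(format(i,'b').zfill(5)); ''.join(reversed(x)) is x reversed.
def cA5 : List (List Char) :=
  (PySem.List.pyRange 0 (2 ^ 5) 1).foldl (fun acc i =>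
    let x := PySem.Chars.zfill (PySem.Int.toBinChars i) 5
    if x = x.reverse then acc ++ [x] else acc) []

-- A's second table loop: x[len(x)::-1] (step -1 never raises, so getD is exact).
def cA6 : List (List Char) :=
  (PySem.List.pyRange 0 (2 ^ 6) 1).foldl (fun acc i =>
    let x := PySem.Chars.zfill (PySem.Int.toBinChars i) 6
    if x = (PySem.List.slice? x (some (PySem.List.len x)) none (-1)).getD [] then acc ++ [x]
    else acc) []

-- the two search loops with early return 1, then return 0
def check56 (a : String) : Int :=
  if cA6.any (fun w => decide (0 ≤ PySem.Chars.find a.toList w)) then 1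
  else if cA5.any (fun w => decide (0 ≤ PySem.Chars.find a.toList w)) then 1
  else 0

-- ===== PORT B =====
-- len(w)==L and all(c in "01" for c in w) and w == w[::-1]  (w[::-1] is w.reverse)
def pvIsBinPal (w : List Char) (L : Int) : Bool :=
  PySem.List.len w == L && w.all (fun c => c == '0' || c == '1') && w == w.reverse

def check56_alt (a : String) : Int :=
  if (PySem.List.pyRange 0 (PySem.List.len a.toList) 1).any (fun i =>
      ([6, 5] : List Int).any (fun L =>
        pvIsBinPal (PySem.List.slice a.toList (some i) (some (i + L))) L))
  then 1 else 0

-- ===== PRECONDITION & SPEC =====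
def Spec_check56 (a : String) (out : Int) : Prop := out = check56_alt a
instance (a : String) (out : Int) : Decidable (Spec_check56 a out) := by unfold Spec_check56; infer_instance

-- ===== CLAIM (what is proved, stated in full; the proofs are below) =====
def Claim_equal_check56 : Prop := ∀ (a : String), Dom_check56 a → Spec_check56 a (check56 a)

-- ===== LEMMAS AND PROOFS =====

-- "w is a binary palindrome that occurs in s" for length L
def pvWin (s : List Char) (L : Nat) : Prop :=
  ∃ w : List Char, w.length = L ∧ (∀ c ∈ w, c = '0' ∨ c = '1') ∧ w = w.reverse ∧ w <:+: s

set_option maxRecDepth 8192 in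
lemma cA5_eq : cA5 =
    [['0','0','0','0','0'], ['0','0','1','0','0'], ['0','1','0','1','0'], ['0','1','1','1','0'],
     ['1','0','0','0','1'], ['1','0','1','0','1'], ['1','1','0','1','1'], ['1','1','1','1','1']] := by
  decide

set_option maxRecDepth 8192 in
lemma cA6_eq : cA6 =
    [['0','0','0','0','0','0'], ['0','0','1','1','0','0'], ['0','1','0','0','1','0'],
     ['0','1','1','1','1','0'], ['1','0','0','0','0','1'], ['1','0','1','1','0','1'],
     ['1','1','0','0','1','1'], ['1','1','1','1','1','1']] := by
  decide

set_option maxRecDepth 8192 in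
lemma mem_cA6_iff (w : List Char) :
    w ∈ cA6 ↔ w.length = 6 ∧ (∀ c ∈ w, c = '0' ∨ c = '1') ∧ w = w.reverse := by
  constructor
  · intro h
    rw [cA6_eq] at h
    simp only [List.mem_cons, List.not_mem_nil, or_false] at h
    rcases h with rfl | rfl | rfl | rfl | rfl | rfl | rfl | rfl <;> refine ⟨by decide, by simp, by decide⟩
  · rintro ⟨hlen, hbin, hpal⟩
    match w, hlen with
    | [a, b, c, d, e, f], _ =>
      simp only [List.reverse_cons, List.reverse_nil, List.nil_append, List.cons_append,
        List.cons.injEq] at hpal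
      obtain ⟨rfl, rfl, rfl, -⟩ := hpal
      rcases hbin a (by simp) with rfl | rfl <;>
        rcases hbin b (by simp) with rfl | rfl <;>
        rcases hbin c (by simp) with rfl | rfl <;> decide

set_option maxRecDepth 8192 in
lemma mem_cA5_iff (w : List Char) :
    w ∈ cA5 ↔ w.length = 5 ∧ (∀ c ∈ w, c = '0' ∨ c = '1') ∧ w = w.reverse := by
  constructor
  · intro h
    rw [cA5_eq] at h
    simp only [List.mem_cons, List.not_mem_nil, or_false] at h
    rcases h with rfl | rfl | rfl | rfl | rfl | rfl | rfl | rfl <;> refine ⟨by decide, by simp, by decide⟩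
  · rintro ⟨hlen, hbin, hpal⟩
    match w, hlen with
    | [a, b, c, d, e], _ =>
      simp only [List.reverse_cons, List.reverse_nil, List.nil_append, List.cons_append,
        List.cons.injEq] at hpal
      obtain ⟨rfl, rfl, -⟩ := hpal
      rcases hbin a (by simp) with rfl | rfl <;>
        rcases hbin b (by simp) with rfl | rfl <;>
        rcases hbin c (by simp) with rfl | rfl <;> decide

-- window characterisation of pvWin
lemma pvWin_iff (s : List Char) (L : Nat) (hL : 0 < L) :
    pvWin s L ↔ ∃ j : Nat, j < s.length ∧
      ((s.drop j).take L).length = L ∧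
      (∀ c ∈ (s.drop j).take L, c = '0' ∨ c = '1') ∧
      (s.drop j).take L = ((s.drop j).take L).reverse := by
  constructor
  · rintro ⟨w, hlen, hbin, hpal, hinf⟩
    have h1 : PySem.Chars.isIn w s = true := (PySem.Chars.isIn_iff_infix w s).mpr hinf
    obtain ⟨j, hpre⟩ := (PySem.Chars.exists_prefix_drop_iff_isIn w s).mpr h1
    have hw : (s.drop j).take w.length = w := (List.prefix_iff_eq_take.mp hpre).symm
    have hne : w ≠ [] := by intro h; rw [h] at hlen; simp at hlen; omega
    have hdne : s.drop j ≠ [] := by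
      intro h; rw [h] at hpre; exact hne (List.prefix_nil.mp hpre)
    have hj : j < s.length := by
      by_contra h
      exact hdne (List.drop_eq_nil_of_le (by omega))
    refine ⟨j, hj, ?_, ?_, ?_⟩ <;> rw [hlen] at hw <;> rw [hw]
    · exact hlen
    · exact hbin
    · exact hpal
  · rintro ⟨j, hj, hlen, hbin, hpal⟩
    exact ⟨(s.drop j).take L, hlen, hbin, hpal,
      (List.take_prefix _ _).isInfix.trans (List.drop_suffix j s).isInfix⟩

lemma pvIsBinPal_iff (s : List Char) (j L : Nat) :
    pvIsBinPal (PySem.List.slice s (some (j : Int)) (some ((j : Int) + (L : Int)))) (L : Int) = true ↔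
      (((s.drop j).take L).length = L ∧
       (∀ c ∈ (s.drop j).take L, c = '0' ∨ c = '1') ∧
       (s.drop j).take L = ((s.drop j).take L).reverse) := by
  rw [PySem.List.slice_natCast_add]
  simp only [pvIsBinPal, Bool.and_eq_true, beq_iff_eq, List.all_eq_true, Bool.or_eq_true,
    PySem.List.len_eq]
  constructor
  · rintro ⟨⟨h1, h2⟩, h3⟩
    exact ⟨by exact_mod_cast h1, fun c hc => by simpa using h2 c hc, h3⟩
  · rintro ⟨h1, h2, h3⟩
    exact ⟨⟨by exact_mod_cast h1, fun c hc => by simpa using h2 c hc⟩, h3⟩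

-- A's combined search condition
lemma A_cond_iff (s : List Char) :
    ((cA6.any (fun w => decide (0 ≤ PySem.Chars.find s w)) ||
      cA5.any (fun w => decide (0 ≤ PySem.Chars.find s w))) = true) ↔
      (pvWin s 6 ∨ pvWin s 5) := by
  simp only [Bool.or_eq_true, List.any_eq_true, decide_eq_true_eq, PySem.Chars.find_nonneg_iff]
  constructor
  · rintro (⟨w, hw, hinf⟩ | ⟨w, hw, hinf⟩)
    · obtain ⟨h1, h2, h3⟩ := (mem_cA6_iff w).mp hw
      exact Or.inl ⟨w, h1, h2, h3, hinf⟩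
    · obtain ⟨h1, h2, h3⟩ := (mem_cA5_iff w).mp hw
      exact Or.inr ⟨w, h1, h2, h3, hinf⟩
  · rintro (⟨w, h1, h2, h3, hinf⟩ | ⟨w, h1, h2, h3, hinf⟩)
    · exact Or.inl ⟨w, (mem_cA6_iff w).mpr ⟨h1, h2, h3⟩, hinf⟩
    · exact Or.inr ⟨w, (mem_cA5_iff w).mpr ⟨h1, h2, h3⟩, hinf⟩

-- B's search condition
lemma B_cond_iff (s : List Char) :
    ((PySem.List.pyRange 0 (PySem.List.len s) 1).any (fun i =>
      ([6, 5] : List Int).any (fun L =>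
        pvIsBinPal (PySem.List.slice s (some i) (some (i + L))) L)) = true) ↔
      (pvWin s 6 ∨ pvWin s 5) := by
  simp only [List.any_eq_true, PySem.List.mem_pyRange_one, PySem.List.len_eq,
    List.mem_cons, List.not_mem_nil, or_false, exists_eq_or_imp, exists_eq_left]
  rw [pvWin_iff s 6 (by omega), pvWin_iff s 5 (by omega)]
  constructor
  · rintro ⟨i, ⟨h0, hlt⟩, h⟩
    lift i to ℕ using h0 with j
    have hj : j < s.length := by exact_mod_cast hlt
    rcases h with h | h
    · exact Or.inl ⟨j, hj, (pvIsBinPal_iff s j 6).mp (by exact_mod_cast h)⟩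
    · exact Or.inr ⟨j, hj, (pvIsBinPal_iff s j 5).mp (by exact_mod_cast h)⟩
  · rintro (⟨j, hj, h⟩ | ⟨j, hj, h⟩)
    · exact ⟨(j : Int), ⟨by positivity, by exact_mod_cast hj⟩,
        Or.inl (by exact_mod_cast (pvIsBinPal_iff s j 6).mpr h)⟩
    · exact ⟨(j : Int), ⟨by positivity, by exact_mod_cast hj⟩,
        Or.inr (by exact_mod_cast (pvIsBinPal_iff s j 5).mpr h)⟩

-- ===== VERDICT (by name: the statement is the Claim_ definition above) =====
theorem check56_spec : Claim_equal_check56 := by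
  intro a _
  unfold Spec_check56 check56 check56_alt
  have hA := A_cond_iff a.toList
  have hB := B_cond_iff a.toList
  by_cases h : pvWin a.toList 6 ∨ pvWin a.toList 5
  · rw [hB.mpr h]
    rcases (Bool.or_eq_true _ _).mp (hA.mpr h) with h' | h'
    · simp [h']
    · simp [h']
  · rw [Bool.eq_false_iff.mpr (fun hc => h (hB.mp hc))]
    rcases Bool.or_eq_false_iff.mp (Bool.eq_false_iff.mpr (fun hc => h (hA.mp hc))) with ⟨h1, h2⟩
    simp [h1, h2]
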